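-- pv_equiv track=rewrite | github.com/ekolivero/foo-bar | lovely_lucky_lambs/solution.py | min_hanchmen_paid
-- ===== SOURCE A (Python) =====
-- def min_hanchmen_paid(total_lambs):
--     # helper variables
--     a = 0
--     b = 1
--     fibonacci = [a,b]
--     while (sum(fibonacci) <= total_lambs):
--         a, b = b, a+b
--         fibonacci.append(b)
--
--     if (sum(fibonacci) > total_lambs):
--         # Commander lambda can't pay the next hanchmen
--         fibonacci.pop()
--         # Clean helper
--         fibonacci.pop(0)
--     else:
--         # Clean helper
--         fibonacci.pop(0)
--
--     #return the n of paid hanchmen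
--     return len(fibonacci)
-- ===== SOURCE B (Python) =====
-- def min_hanchmen_paid(total_lambs):
--     a, b = 1, 1
--     s = 0
--     count = 0
--     while s + a <= total_lambs:
--         s += a
--         count += 1
--         a, b = b, a + b
--     return count
-- ===== Notes on version B (the rewrite author's own statement) =====
-- stated objective: simpler
-- what changed: B keeps a running sum and a counter with a look-ahead test (s + a <= total) instead of A's growing Fibonacci list that is re-summed every iteration and trimmed by two pops after the loop.
import Mathlib
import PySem

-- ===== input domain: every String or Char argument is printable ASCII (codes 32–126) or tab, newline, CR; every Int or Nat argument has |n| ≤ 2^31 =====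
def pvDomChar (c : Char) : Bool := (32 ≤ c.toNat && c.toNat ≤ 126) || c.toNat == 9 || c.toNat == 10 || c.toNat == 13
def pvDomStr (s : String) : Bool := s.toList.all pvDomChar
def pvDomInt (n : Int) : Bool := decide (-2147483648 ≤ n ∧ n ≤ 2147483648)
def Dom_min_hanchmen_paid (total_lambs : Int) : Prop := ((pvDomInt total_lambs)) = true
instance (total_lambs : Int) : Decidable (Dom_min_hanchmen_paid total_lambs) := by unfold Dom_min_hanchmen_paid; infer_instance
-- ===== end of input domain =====

-- B replaces A's build-a-list-and-resum loop (with its post-loop pops) by a running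
-- sum and counter with a look-ahead test; equal return value on every Int (simpler).
-- Both loop ports take a fuel argument only to be total; the supplied fuel is always
-- sufficient (the proofs never reach the fuel-0 branch from the entry points).

-- ===== PORT A =====
-- the while loop: while sum(fibonacci) <= total_lambs: a, b = b, a+b; fibonacci.append(b)
def minHanchAux : Nat → Int → Int → Int → List Int → List Int
  | 0, _, _, _, fib => fib
  | n + 1, total, a, b, fib =>
    if fib.sum ≤ total then minHanchAux n total b (a + b) (fib ++ [a + b]) else fib

def min_hanchmen_paid (total_lambs : Int) : Int :=
  -- a = 0; b = 1; fibonacci = [a, b]; while …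
  let fib := minHanchAux (total_lambs + 1).toNat total_lambs 0 1 [0, 1]
  let fib2 : List Int :=
    if fib.sum > total_lambs then
      -- fibonacci.pop(); fibonacci.pop(0)   (pop on the lists reached here never raises)
      let f1 := ((PySem.List.pop? fib (-1)).map Prod.snd).getD []
      ((PySem.List.pop? f1 0).map Prod.snd).getD []
    else
      -- fibonacci.pop(0)
      ((PySem.List.pop? fib 0).map Prod.snd).getD []
  (fib2.length : Int)

-- ===== PORT B =====
-- while s + a <= total_lambs: s += a; count += 1; a, b = b, a+b
def minHanchAltAux : Nat → Int → Int → Int → Int → Int → Int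
  | 0, _, _, _, _, count => count
  | n + 1, total, a, b, s, count =>
    if s + a ≤ total then minHanchAltAux n total b (a + b) (s + a) (count + 1) else count

def min_hanchmen_paid_alt (total_lambs : Int) : Int :=
  minHanchAltAux (total_lambs + 1).toNat total_lambs 1 1 0 0

-- ===== PRECONDITION & SPEC =====
def Spec_min_hanchmen_paid (total_lambs : Int) (out : Int) : Prop := out = min_hanchmen_paid_alt total_lambs
instance (total_lambs : Int) (out : Int) : Decidable (Spec_min_hanchmen_paid total_lambs out) := by unfold Spec_min_hanchmen_paid; infer_instance

-- ===== CLAIM (what is proved, stated in full; the proofs are below) =====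
def Claim_equal_min_hanchmen_paid : Prop := ∀ (total_lambs : Int), Dom_min_hanchmen_paid total_lambs → Spec_min_hanchmen_paid total_lambs (min_hanchmen_paid total_lambs)

-- ===== LEMMAS AND PROOFS =====

-- Joint loop invariant: A's list sum equals B's s + a, A's (a,b) lag B's by one step,
-- and A's list is two longer than B's count; the shared fuel n always suffices
-- (total < fib.sum + n).  Conclusion: at exit A's sum exceeds the budget, the
-- lengths still correspond, and B's counter never decreased.
theorem minHanch_loops :
    ∀ (n : Nat) (total aA bA aB bB s count : Int) (fib : List Int),
      1 ≤ aB → 1 ≤ bB →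
      total < fib.sum + n →
      fib.sum = s + aB → bA = aB → aA + bA = bB →
      (fib.length : Int) = count + 2 →
      total < (minHanchAux n total aA bA fib).sum ∧
      ((minHanchAux n total aA bA fib).length : Int) =
        minHanchAltAux n total aB bB s count + 2 ∧
      count ≤ minHanchAltAux n total aB bB s count := by
  intro n
  induction n with
  | zero =>
    intro total aA bA aB bB s count fib haB hbB hfuel hsum hba hab hlen
    exact ⟨by simpa [minHanchAux] using hfuel, by simpa [minHanchAux, minHanchAltAux], le_rfl⟩
  | succ n ih =>
    intro total aA bA aB bB s count fib haB hbB hfuel hsum hba hab hlen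
    rw [minHanchAux, minHanchAltAux]
    by_cases h : fib.sum ≤ total
    · rw [if_pos h, if_pos (by omega : s + aB ≤ total)]
      have := ih total bA (aA + bA) bB (aB + bB) (s + aB) (count + 1)
        (fib ++ [aA + bA]) hbB (by omega)
        (by simp only [List.sum_append, List.sum_cons, List.sum_nil]; omega)
        (by simp only [List.sum_append, List.sum_cons, List.sum_nil]; omega)
        (by omega) (by omega)
        (by simp only [List.length_append, List.length_cons, List.length_nil]; push_cast; omega)
      exact ⟨this.1, this.2.1, by omega⟩
    · rw [if_neg h, if_neg (by omega : ¬ s + aB ≤ total)]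
      exact ⟨by omega, by omega, le_rfl⟩

-- ===== VERDICT (by name: the statement is the Claim_ definition above) =====
theorem min_hanchmen_paid_spec : Claim_equal_min_hanchmen_paid := by
  intro total _
  unfold Spec_min_hanchmen_paid min_hanchmen_paid min_hanchmen_paid_alt
  obtain ⟨hgt, hlen, hge⟩ := minHanch_loops (total + 1).toNat total 0 1 1 1 0 0 [0, 1]
    le_rfl le_rfl (by simp; omega) (by simp) rfl rfl (by simp)
  set fib := minHanchAux (total + 1).toNat total 0 1 [0, 1] with hfib
  set alt := minHanchAltAux (total + 1).toNat total 1 1 0 0 with halt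
  match hsh : fib with
  | [] => simp at hlen; omega
  | [x] => simp at hlen; omega
  | x :: y :: rest =>
    have hne2 : (y :: rest : List Int) ≠ [] := by simp
    have hsplit : (x :: y :: rest : List Int)
        = (x :: (y :: rest).dropLast) ++ [(y :: rest).getLast hne2] := by
      conv_lhs => rw [← List.dropLast_append_getLast (show (x :: y :: rest : List Int) ≠ [] by simp)]
      rw [List.dropLast_cons₂, List.getLast_cons hne2]
    simp only [if_pos hgt]
    rw [hsplit]
    simp only [PySem.List.pop?_last, Option.map_some, Option.getD_some, PySem.List.pop?_zero_cons]
    simp only [List.length_cons] at hlen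
    simp only [List.length_dropLast, List.length_cons]
    push_cast at hlen ⊢
    omega
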